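-- pv_equiv track=rewrite | github.com/dwgx/YuKiBot | core/chat_splitter.py | _normalize_reply_text
-- ===== SOURCE A (Python) =====
-- def _normalize_reply_text(text: str) -> str:
--     raw = str(text or "").replace("\r\n", "\n").replace("\r", "\n")
--     if not raw.strip():
--         return ""
--     lines: list[str] = []
--     blank = False
--     for line in raw.split("\n"):
--         clean = line.strip()
--         if clean:
--             lines.append(clean)
--             blank = False
--             continue
--         if lines and not blank:
--             lines.append("")
--             blank = True
--     while lines and not lines[0]:
--         lines.pop(0)
--     while lines and not lines[-1]:
--         lines.pop()
--     return "\n".join(lines)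
-- ===== SOURCE B (Python) =====
-- def _normalize_reply_text(text: str) -> str:
--     raw = str(text or "").replace("\r\n", "\n").replace("\r", "\n")
--     paragraphs = []
--     cur = []
--     for line in raw.split("\n"):
--         clean = line.strip()
--         if clean:
--             cur.append(clean)
--         elif cur:
--             paragraphs.append("\n".join(cur))
--             cur = []
--     if cur:
--         paragraphs.append("\n".join(cur))
--     return "\n\n".join(paragraphs)
-- ===== Notes on version B (the rewrite author's own statement) =====
-- stated objective: simpler
-- what changed: Replaces A's blank-flag state machine with interleaved empty-line markers plus two edge pop-trim loops by a single paragraph-grouping pass whose paragraphs are joined with a double newline, so no blank flag and no edge trimming are needed.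
import Mathlib
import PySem

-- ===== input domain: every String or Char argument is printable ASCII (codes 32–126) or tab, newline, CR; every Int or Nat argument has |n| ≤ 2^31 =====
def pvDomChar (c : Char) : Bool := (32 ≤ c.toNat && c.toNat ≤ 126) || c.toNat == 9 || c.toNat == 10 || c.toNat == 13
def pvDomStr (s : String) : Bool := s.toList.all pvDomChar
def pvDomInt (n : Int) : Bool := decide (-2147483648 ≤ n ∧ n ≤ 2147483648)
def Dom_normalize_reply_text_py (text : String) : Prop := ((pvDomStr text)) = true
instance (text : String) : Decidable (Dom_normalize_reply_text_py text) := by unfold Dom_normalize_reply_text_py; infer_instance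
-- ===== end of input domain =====

-- B replaces A's blank-flag state machine plus the two edge pop-loops by a simpler
-- paragraph-grouping pass joined with "\n\n" (same return value on every input).

-- ===== PORT A =====
-- the for-loop of A over the split lines, carrying (lines, blank); branch order as in Python
def nrtA_loop : List (List Char) → List (List Char) → Bool → List (List Char)
  | [], lines, _ => lines
  | line :: rest, lines, blank =>
    let clean := PySem.Chars.strip line
    if clean ≠ [] then nrtA_loop rest (lines ++ [clean]) false
    else if lines ≠ [] ∧ blank = false then nrtA_loop rest (lines ++ [[]]) true
    else nrtA_loop rest lines blank

-- `while lines and not lines[0]: lines.pop(0)` — drop leading empty lines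
def nrtA_trimLead (l : List (List Char)) : List (List Char) := l.dropWhile (· = [])
-- `while lines and not lines[-1]: lines.pop()` — the same pop-loop from the right end
def nrtA_trimTrail (l : List (List Char)) : List (List Char) := (l.reverse.dropWhile (· = [])).reverse

-- str(text or "") is the identity on a String argument; the work is done on the char list
def normalize_reply_text_py (text : String) : String :=
  let raw := PySem.Chars.replace (PySem.Chars.replace text.toList ['\r', '\n'] ['\n']) ['\r'] ['\n']
  if PySem.Chars.strip raw = [] then ""
  else String.ofList (PySem.Chars.join ['\n']
    (nrtA_trimTrail (nrtA_trimLead (nrtA_loop (PySem.Chars.splitOn raw ['\n']) [] false))))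

-- ===== PORT B =====
-- B's loop carries (paragraphs, cur); a paragraph is closed (joined with "\n") at a blank line
def nrtB_loop : List (List Char) → List (List Char) → List (List Char) →
    List (List Char) × List (List Char)
  | [], paras, cur => (paras, cur)
  | line :: rest, paras, cur =>
    let clean := PySem.Chars.strip line
    if clean ≠ [] then nrtB_loop rest paras (cur ++ [clean])
    else if cur ≠ [] then nrtB_loop rest (paras ++ [PySem.Chars.join ['\n'] cur]) []
    else nrtB_loop rest paras cur

def normalize_reply_text_py_alt (text : String) : String :=
  let raw := PySem.Chars.replace (PySem.Chars.replace text.toList ['\r', '\n'] ['\n']) ['\r'] ['\n']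
  let pc := nrtB_loop (PySem.Chars.splitOn raw ['\n']) [] []
  let paras := if pc.2 ≠ [] then pc.1 ++ [PySem.Chars.join ['\n'] pc.2] else pc.1
  String.ofList (PySem.Chars.join ['\n', '\n'] paras)

-- ===== PRECONDITION & SPEC =====
def Spec_normalize_reply_text_py (text : String) (out : String) : Prop := out = normalize_reply_text_py_alt text
instance (text : String) (out : String) : Decidable (Spec_normalize_reply_text_py text out) := by unfold Spec_normalize_reply_text_py; infer_instance

-- ===== CLAIM (what is proved, stated in full; the proofs are below) =====
def Claim_equal_normalize_reply_text_py : Prop := ∀ (text : String), Dom_normalize_reply_text_py text → Spec_normalize_reply_text_py text (normalize_reply_text_py text)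

-- ===== LEMMAS AND PROOFS =====

-- A's `lines` list, reconstructed from B's closed paragraph groups: each group followed by ""
def nrtInter (Q : List (List (List Char))) : List (List Char) :=
  (Q.map (fun g => g ++ [[]])).flatten

def nrtGroupsOK (Q : List (List (List Char))) : Prop :=
  ∀ g ∈ Q, g ≠ [] ∧ ∀ l ∈ g, l ≠ []

-- coupling invariant between A's (lines, blank) and B's (paras, cur)
def nrtInv (lines : List (List Char)) (blank : Bool)
    (paras : List (List Char)) (cur : List (List Char)) : Prop :=
  ∃ Q : List (List (List Char)),
    paras = Q.map (PySem.Chars.join ['\n']) ∧ nrtGroupsOK Q ∧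
    ((cur = [] ∧ blank = false ∧ Q = [] ∧ lines = []) ∨
     (cur = [] ∧ blank = true ∧ Q ≠ [] ∧ lines = nrtInter Q) ∨
     (cur ≠ [] ∧ blank = false ∧ (∀ l ∈ cur, l ≠ []) ∧ lines = nrtInter Q ++ cur))

theorem nrt_join_append (sep : List Char) (a b : List (List Char)) (ha : a ≠ []) (hb : b ≠ []) :
    PySem.Chars.join sep (a ++ b) = PySem.Chars.join sep a ++ sep ++ PySem.Chars.join sep b := by
  induction a with
  | nil => exact absurd rfl ha
  | cons x a ih =>
    cases a with
    | nil =>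
      cases b with
      | nil => exact absurd rfl hb
      | cons y t => simp [PySem.Chars.join_cons_cons, PySem.Chars.join_singleton]
    | cons x2 a' =>
      rw [show (x :: x2 :: a') ++ b = x :: x2 :: (a' ++ b) from rfl,
        PySem.Chars.join_cons_cons, show x2 :: (a' ++ b) = (x2 :: a') ++ b from rfl,
        ih (by simp), PySem.Chars.join_cons_cons]
      simp [List.append_assoc]

-- the fundamental join identity: A's lines-with-blank-separators joined by "\n"
-- equals B's paragraphs joined by "\n\n"
theorem nrt_L1 (Q : List (List (List Char))) (C : List (List Char))
    (hC : C ≠ []) (hQ : ∀ g ∈ Q, g ≠ []) :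
    PySem.Chars.join ['\n'] (nrtInter Q ++ C) =
    PySem.Chars.join ['\n', '\n'] (Q.map (PySem.Chars.join ['\n']) ++ [PySem.Chars.join ['\n'] C]) := by
  induction Q with
  | nil => simp [nrtInter, PySem.Chars.join_singleton]
  | cons g Q' ih =>
    have hg : g ≠ [] := hQ g (by simp)
    have hR : nrtInter Q' ++ C ≠ [] := by
      intro h; exact hC (List.append_eq_nil_iff.mp h).2
    have step1 : nrtInter (g :: Q') ++ C = g ++ ([] :: (nrtInter Q' ++ C)) := by
      simp [nrtInter, List.append_assoc]
    rw [step1, nrt_join_append ['\n'] g ([] :: (nrtInter Q' ++ C)) hg (by simp)]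
    obtain ⟨r, R, hRR⟩ : ∃ r R, nrtInter Q' ++ C = r :: R :=
      List.exists_cons_of_ne_nil hR
    rw [hRR, PySem.Chars.join_cons_cons, ← hRR,
        ih (fun g hg' => hQ g (by simp [hg']))]
    obtain ⟨p, P, hPP⟩ : ∃ p P, Q'.map (PySem.Chars.join ['\n']) ++ [PySem.Chars.join ['\n'] C] = p :: P :=
      List.exists_cons_of_ne_nil (by simp)
    have hmap : (g :: Q').map (PySem.Chars.join ['\n']) ++ [PySem.Chars.join ['\n'] C]
        = PySem.Chars.join ['\n'] g :: (p :: P) := by simp [hPP]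
    rw [hmap, PySem.Chars.join_cons_cons, ← hPP]
    simp [List.append_assoc]

theorem nrt_trimLead_cons (x : List Char) (xs : List (List Char)) (hx : x ≠ []) :
    nrtA_trimLead (x :: xs) = x :: xs := by
  simp [nrtA_trimLead, hx]

theorem nrt_trimTrail_concat (xs : List (List Char)) (x : List Char) (hx : x ≠ []) :
    nrtA_trimTrail (xs ++ [x]) = xs ++ [x] := by
  simp [nrtA_trimTrail, hx]

theorem nrtInter_concat (Q : List (List (List Char))) (g : List (List Char)) :
    nrtInter (Q ++ [g]) = (nrtInter Q ++ g) ++ [[]] := by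
  simp [nrtInter, List.append_assoc]

-- nrtInter of a nonempty OK group list starts with a nonempty line
theorem nrtInter_head (Q : List (List (List Char))) (hOK : nrtGroupsOK Q) (hQ : Q ≠ []) :
    ∃ y ys, nrtInter Q = y :: ys ∧ y ≠ [] := by
  obtain ⟨g, Q', rfl⟩ := List.exists_cons_of_ne_nil hQ
  have hg : g ≠ [] := (hOK g (by simp)).1
  obtain ⟨l, g', rfl⟩ := List.exists_cons_of_ne_nil hg
  refine ⟨l, g' ++ [[]] ++ nrtInter Q', by simp [nrtInter, List.append_assoc], ?_⟩
  exact (hOK (l :: g') (by simp)).2 l (by simp)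

-- the loops agree: from coupled states, A's final joined string equals B's
theorem nrt_loops_agree (ls : List (List Char)) :
    ∀ lines blank paras cur, nrtInv lines blank paras cur →
    PySem.Chars.join ['\n'] (nrtA_trimTrail (nrtA_trimLead (nrtA_loop ls lines blank))) =
    PySem.Chars.join ['\n', '\n']
      (if (nrtB_loop ls paras cur).2 ≠ [] then
        (nrtB_loop ls paras cur).1 ++ [PySem.Chars.join ['\n'] (nrtB_loop ls paras cur).2]
       else (nrtB_loop ls paras cur).1) := by
  induction ls with
  | nil =>
    intro lines blank paras cur hinv
    obtain ⟨Q, hP, hOK, hcase⟩ := hinv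
    simp only [nrtA_loop, nrtB_loop]
    rcases hcase with ⟨hc, hb, hQ, hl⟩ | ⟨hc, hb, hQ, hl⟩ | ⟨hc, hb, hcl, hl⟩
    · subst hl hc hQ; simp [nrtA_trimLead, nrtA_trimTrail, hP, PySem.Chars.join_nil]
    · -- lines = nrtInter Q with Q ≠ []: the trims strip exactly the final blank marker
      subst hl hc hP
      obtain ⟨Q', g, hQc⟩ := Q.eq_nil_or_concat.resolve_left hQ
      rw [List.concat_eq_append] at hQc
      subst hQc
      have hg : g ≠ [] := (hOK g (by simp)).1
      have hTT : nrtA_trimTrail (nrtInter (Q' ++ [g])) = nrtInter Q' ++ g := by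
        obtain ⟨g', lst, hgc⟩ := g.eq_nil_or_concat.resolve_left hg
        rw [List.concat_eq_append] at hgc
        subst hgc
        have hlst : lst ≠ [] := (hOK (g' ++ [lst]) (by simp)).2 lst (by simp)
        rw [nrtInter_concat]
        simp only [nrtA_trimTrail, List.reverse_append, List.reverse_cons, List.reverse_nil,
          List.nil_append]
        simp [hlst, List.append_assoc]
      have hTL : nrtA_trimLead (nrtInter (Q' ++ [g])) = nrtInter (Q' ++ [g]) := by
        obtain ⟨y, ys, hI, hy⟩ := nrtInter_head (Q' ++ [g]) hOK (by simp)
        rw [hI, nrt_trimLead_cons y ys hy]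
      rw [hTL, hTT, nrt_L1 Q' g hg (fun gg h => (hOK gg (by simp [h])).1)]
      simp
    · -- cur ≠ []: lines = nrtInter Q ++ cur, no trailing blank, head nonempty
      subst hl hP
      obtain ⟨c', cl, hcc⟩ := cur.eq_nil_or_concat.resolve_left hc
      rw [List.concat_eq_append] at hcc
      subst hcc
      have hclne : cl ≠ [] := hcl cl (by simp)
      have hTT : nrtA_trimTrail (nrtInter Q ++ (c' ++ [cl])) = nrtInter Q ++ (c' ++ [cl]) := by
        rw [show nrtInter Q ++ (c' ++ [cl]) = (nrtInter Q ++ c') ++ [cl] by simp [List.append_assoc]]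
        rw [nrt_trimTrail_concat _ cl hclne]
      have hTL : nrtA_trimLead (nrtInter Q ++ (c' ++ [cl])) = nrtInter Q ++ (c' ++ [cl]) := by
        rcases Q with _ | ⟨g0, Q''⟩
        · cases c' with
          | nil => simp [nrtInter, nrtA_trimLead, hclne]
          | cons y ys =>
            have hy : y ≠ [] := hcl y (by simp)
            simp [nrtInter, nrtA_trimLead, hy]
        · obtain ⟨y, ys, hI, hy⟩ := nrtInter_head (g0 :: Q'') hOK (by simp)
          rw [hI, show y :: ys ++ (c' ++ [cl]) = y :: (ys ++ (c' ++ [cl])) by simp,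
            nrt_trimLead_cons _ _ hy]
      rw [hTL, hTT, nrt_L1 Q (c' ++ [cl]) (by simp) (fun gg h => (hOK gg h).1), if_pos hc]
  | cons line rest ih =>
    intro lines blank paras cur hinv
    obtain ⟨Q, hP, hOK, hcase⟩ := hinv
    simp only [nrtA_loop, nrtB_loop]
    by_cases hcl : PySem.Chars.strip line = []
    · rcases hcase with ⟨hc, hb, hQ, hl⟩ | ⟨hc, hb, hQ, hl⟩ | ⟨hc, hb, hcur, hl⟩
      · subst hb hc hl hQ
        simp only [List.map_nil] at hP
        subst hP
        simpa [hcl] using ih [] false [] [] ⟨[], rfl, hOK, Or.inl ⟨rfl, rfl, rfl, rfl⟩⟩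
      · subst hb hc hl hP
        simpa [hcl] using ih (nrtInter Q) true (Q.map (PySem.Chars.join ['\n'])) []
          ⟨Q, rfl, hOK, Or.inr (Or.inl ⟨rfl, rfl, hQ, rfl⟩)⟩
      · subst hb hl hP
        have hlne : nrtInter Q ++ cur ≠ [] := by
          intro h; exact hc (List.append_eq_nil_iff.mp h).2
        have hOK' : nrtGroupsOK (Q ++ [cur]) := by
          intro g hg
          rcases List.mem_append.mp hg with h | h
          · exact hOK g h
          · simp at h; subst h; exact ⟨hc, hcur⟩
        simpa [hcl, hc, hlne] using
          ih ((nrtInter Q ++ cur) ++ [[]]) true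
            (Q.map (PySem.Chars.join ['\n']) ++ [PySem.Chars.join ['\n'] cur]) []
            ⟨Q ++ [cur], by simp, hOK', Or.inr (Or.inl ⟨rfl, rfl, by simp,
              (nrtInter_concat Q cur).symm⟩)⟩
    · rcases hcase with ⟨hc, hb, hQ, hl⟩ | ⟨hc, hb, hQ, hl⟩ | ⟨hc, hb, hcur, hl⟩
      · subst hb hc hl hQ
        simp only [List.map_nil] at hP
        subst hP
        simpa [hcl] using ih [PySem.Chars.strip line] false [] [PySem.Chars.strip line]
          ⟨[], rfl, hOK, Or.inr (Or.inr ⟨by simp, rfl, by simp [hcl], by simp [nrtInter]⟩)⟩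
      · subst hb hc hl hP
        simpa [hcl] using ih (nrtInter Q ++ [PySem.Chars.strip line]) false
          (Q.map (PySem.Chars.join ['\n'])) [PySem.Chars.strip line]
          ⟨Q, rfl, hOK, Or.inr (Or.inr ⟨by simp, rfl, by simp [hcl], rfl⟩)⟩
      · subst hb hl hP
        have hcur' : ∀ l ∈ cur ++ [PySem.Chars.strip line], l ≠ [] := by
          intro l hlm
          rcases List.mem_append.mp hlm with h | h
          · exact hcur l h
          · simp at h; subst h; exact hcl
        simpa [hcl] using ih ((nrtInter Q ++ cur) ++ [PySem.Chars.strip line]) false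
          (Q.map (PySem.Chars.join ['\n'])) (cur ++ [PySem.Chars.strip line])
          ⟨Q, rfl, hOK, Or.inr (Or.inr ⟨by simp, rfl, hcur',
            by simp [List.append_assoc]⟩)⟩

-- `strip` is empty exactly on all-whitespace strings
theorem nrt_strip_eq_nil_iff (s : List Char) :
    PySem.Chars.strip s = [] ↔ ∀ c ∈ s, PySem.Chars.isspace c = true := by
  unfold PySem.Chars.strip PySem.Chars.rstrip PySem.Chars.lstrip
  rw [List.reverse_eq_nil_iff, List.dropWhile_eq_nil_iff]
  constructor
  · intro h c hcs
    have hc2 : c ∈ List.takeWhile PySem.Chars.isspace s ++ List.dropWhile PySem.Chars.isspace s := by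
      rw [List.takeWhile_append_dropWhile]; exact hcs
    rcases List.mem_append.mp hc2 with h1 | h1
    · exact List.mem_takeWhile_imp h1
    · exact h c (List.mem_reverse.mpr h1)
  · intro h c hcs
    exact h c ((List.dropWhile_sublist _).subset (List.mem_reverse.mp hcs))

-- every piece produced by splitOn.go from all-whitespace material is all-whitespace
theorem nrt_go_space (sep : List Char) :
    ∀ (fuel : Nat) (l cur : List Char) (acc : List (List Char)),
    (∀ c ∈ l, PySem.Chars.isspace c = true) → (∀ c ∈ cur, PySem.Chars.isspace c = true) →
    (∀ p ∈ acc, ∀ c ∈ p, PySem.Chars.isspace c = true) →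
    ∀ p ∈ PySem.Chars.splitOn.go sep fuel l cur acc, ∀ c ∈ p, PySem.Chars.isspace c = true := by
  intro fuel
  induction fuel with
  | zero =>
    intro l cur acc hl hcur hacc p hp
    rw [PySem.Chars.splitOn.go.eq_def] at hp
    simp only [List.mem_reverse, List.mem_cons] at hp
    rcases hp with rfl | hp
    · intro c hc
      rcases List.mem_append.mp hc with h | h
      · exact hcur c (List.mem_reverse.mp h)
      · exact hl c h
    · exact hacc p hp
  | succ fuel ih =>
    intro l cur acc hl hcur hacc p hp
    cases l with
    | nil =>
      rw [PySem.Chars.splitOn.go.eq_def] at hp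
      simp only [List.mem_reverse, List.mem_cons] at hp
      rcases hp with rfl | hp
      · intro c hc; exact hcur c (List.mem_reverse.mp hc)
      · exact hacc p hp
    | cons c0 rest =>
      rw [PySem.Chars.splitOn.go.eq_def] at hp
      simp only at hp
      by_cases hpre : sep.isPrefixOf (c0 :: rest) = true
      · rw [if_pos hpre] at hp
        refine ih _ [] _ (fun c hc => hl c (List.mem_of_mem_drop hc)) (by simp) ?_ p hp
        intro q hq
        rcases List.mem_cons.mp hq with rfl | hq
        · intro c hc; exact hcur c (List.mem_reverse.mp hc)
        · exact hacc q hq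
      · rw [if_neg hpre] at hp
        refine ih rest (c0 :: cur) acc (fun c hc => hl c (by simp [hc])) ?_ hacc p hp
        intro c hc
        rcases List.mem_cons.mp hc with rfl | hc
        · exact hl c (by simp)
        · exact hcur c hc
theorem nrtB_loop_allblank (ls : List (List Char))
    (h : ∀ p ∈ ls, PySem.Chars.strip p = []) : nrtB_loop ls [] [] = ([], []) := by
  induction ls with
  | nil => rfl
  | cons p rest ih =>
    simp only [nrtB_loop]
    rw [if_neg (by simp [h p (by simp)]), if_neg (by simp)]
    exact ih (fun q hq => h q (by simp [hq]))

-- ===== VERDICT (by name: the statement is the Claim_ definition above) =====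
theorem normalize_reply_text_py_spec : Claim_equal_normalize_reply_text_py := by
  intro text _
  unfold Spec_normalize_reply_text_py normalize_reply_text_py normalize_reply_text_py_alt
  simp only []
  set raw := PySem.Chars.replace (PySem.Chars.replace text.toList ['\r', '\n'] ['\n']) ['\r'] ['\n'] with hraw
  by_cases hg : PySem.Chars.strip raw = []
  · rw [if_pos hg]
    have hspace : ∀ c ∈ raw, PySem.Chars.isspace c = true := (nrt_strip_eq_nil_iff raw).mp hg
    have hpieces : ∀ p ∈ PySem.Chars.splitOn raw ['\n'], PySem.Chars.strip p = [] := by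
      intro p hp
      exact (nrt_strip_eq_nil_iff p).mpr
        (nrt_go_space ['\n'] (raw.length + 1) raw [] [] hspace (by simp) (by simp) p hp)
    rw [nrtB_loop_allblank _ hpieces]
    simp [PySem.Chars.join_nil]
  · rw [if_neg hg]
    have h := nrt_loops_agree (PySem.Chars.splitOn raw ['\n']) [] false [] []
      ⟨[], rfl, by intro g hg'; simp at hg', Or.inl ⟨rfl, rfl, rfl, rfl⟩⟩
    exact congrArg String.ofList h
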